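-- pv_equiv track=rewrite | github.com/leo-zhang-93/adventOfCode | 2024/script_20241221.py | calc_dist_dir
-- ===== SOURCE A (Python) =====
-- directions = [
--     [0, 1, '>'],
--     [0, -1, '<'],
--     [1, 0, 'v'],
--     [-1, 0, '^'],
-- ]
--
-- grid2 = [
--     ['#', '^', 'A'],
--     ['<', 'v', '>'],
-- ]
--
-- dic_pos2 = {
--     '^': [0, 1],
--     'A': [0, 2],
--     '<': [1, 0],
--     'v': [1, 1],
--     '>': [1, 2],
-- }
--
-- dic_paths2 = {}
--
-- def calc_dist_dir(s, e):
--     """Calculates the path from s to e on the directional pad."""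
--     if s == e:
--         return ['']
--     if (s, e) in dic_paths2:
--         return dic_paths2[(s, e)]
--     sx, sy = dic_pos2[s]
--     ex, ey = dic_pos2[e]
--     res = []
--     for dx, dy, sign in directions:
--         xx = sx + dx
--         yy = sy + dy
--         if (0 <= xx < len(grid2) and 0 <= yy < len(grid2[0]) and grid2[xx][yy] != '#' and
--                 min(sx, ex) <= xx <= max(sx, ex) and min(sy, ey) <= yy <= max(sy, ey)):
--             res += [sign + item for item in calc_dist_dir(grid2[xx][yy], e)]
--     dic_paths2[(s, e)] = res
--     return res
-- ===== SOURCE B (Python) =====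
-- _POS = {'^': (0, 1), 'A': (0, 2), '<': (1, 0), 'v': (1, 1), '>': (1, 2)}
--
--
-- def _seqs(r, l, d, u):
--     """All distinct interleavings of r '>'s, l '<'s, d 'v's, u '^'s,
--     generated in priority order > < v ^ (lexicographically smallest first)."""
--     if r == 0 and l == 0 and d == 0 and u == 0:
--         return ['']
--     out = []
--     if r:
--         out += ['>' + t for t in _seqs(r - 1, l, d, u)]
--     if l:
--         out += ['<' + t for t in _seqs(r, l - 1, d, u)]
--     if d:
--         out += ['v' + t for t in _seqs(r, l, d - 1, u)]
--     if u:
--         out += ['^' + t for t in _seqs(r, l, d, u - 1)]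
--     return out
--
--
-- def _safe(x, y, path):
--     """Walk path from (x, y); True iff the gap (0, 0) is never entered."""
--     for ch in path:
--         if ch == '>':
--             y += 1
--         elif ch == '<':
--             y -= 1
--         elif ch == 'v':
--             x += 1
--         else:
--             x -= 1
--         if x == 0 and y == 0:
--             return False
--     return True
--
--
-- def calc_dist_dir(s, e):
--     """Calculates the path from s to e on the directional pad."""
--     if s == e:
--         return ['']
--     sx, sy = _POS[s]
--     ex, ey = _POS[e]
--     moves = _seqs(max(ey - sy, 0), max(sy - ey, 0), max(ex - sx, 0), max(sx - ex, 0))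
--     return [p for p in moves if _safe(sx, sy, p)]
-- ===== Notes on version B (the rewrite author's own statement) =====
-- stated objective: alternative
-- what changed: Replaces A's memoised grid DFS (trying the four pad directions at each cell within the bounding box) with a direct construction: build the multiset of monotone moves from the coordinate deltas, generate its distinct interleavings recursively in the priority order > < v ^ (which is exactly A's DFS emission order), and keep those whose simulated walk never enters the gap cell.
import Mathlib
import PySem

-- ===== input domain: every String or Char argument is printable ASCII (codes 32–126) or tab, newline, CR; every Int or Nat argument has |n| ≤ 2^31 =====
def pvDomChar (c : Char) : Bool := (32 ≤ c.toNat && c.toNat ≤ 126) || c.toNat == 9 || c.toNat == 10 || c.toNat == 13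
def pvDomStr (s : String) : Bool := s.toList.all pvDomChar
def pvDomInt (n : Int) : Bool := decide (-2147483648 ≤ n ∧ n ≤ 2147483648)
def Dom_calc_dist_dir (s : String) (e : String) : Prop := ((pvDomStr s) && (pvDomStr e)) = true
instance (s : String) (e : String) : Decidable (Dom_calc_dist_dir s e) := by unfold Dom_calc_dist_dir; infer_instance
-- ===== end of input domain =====

-- B replaces A's grid DFS by generating the monotone move multiset's interleavings directly and
-- filtering out walks through the gap (objective: alternative / more direct; same output order by
-- construction). A also memoises results in a module-level dict (a cache that never changes the
-- return value); B does not — the equivalence here is about the return value.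

-- ===== PORT A =====
def pvDirections : List (Int × Int × String) := [(0, 1, ">"), (0, -1, "<"), (1, 0, "v"), (-1, 0, "^")]

def pvGrid2 : List (List String) := [["#", "^", "A"], ["<", "v", ">"]]

def pvDicPos2 : PySem.Dict String (Int × Int) :=
  PySem.Dict.ofList [("^", (0, 1)), ("A", (0, 2)), ("<", (1, 0)), ("v", (1, 1)), (">", (1, 2))]

-- grid2[xx][yy]; only evaluated under the bounds checks, so the defaults are never used
def pvGridAt (xx yy : Int) : String :=
  PySem.List.pyGetD (PySem.List.pyGetD pvGrid2 xx []) yy "#"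

-- A's recursion, with a fuel counter that only makes it total: on the 2×3 pad every recursive
-- chain shortens the remaining Manhattan distance (≤ 3), so fuel 8 is never exhausted.
def pvCalcAux : Nat → String → String → List String
  | 0, _, _ => []
  | n + 1, s, e =>
    if s == e then [""]
    else
      match PySem.Dict.get? pvDicPos2 s, PySem.Dict.get? pvDicPos2 e with
      | some (sx, sy), some (ex, ey) =>
        pvDirections.foldl (fun res dir =>
          let xx := sx + dir.1
          let yy := sy + dir.2.1
          if 0 ≤ xx ∧ xx < (pvGrid2.length : Int) ∧ 0 ≤ yy ∧
              yy < ((PySem.List.pyGetD pvGrid2 0 []).length : Int) ∧ pvGridAt xx yy ≠ "#" ∧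
              min sx ex ≤ xx ∧ xx ≤ max sx ex ∧ min sy ey ≤ yy ∧ yy ≤ max sy ey then
            res ++ (pvCalcAux n (pvGridAt xx yy) e).map (fun item => dir.2.2 ++ item)
          else res) []
      | _, _ => []   -- dic_pos2[s] / dic_pos2[e] raises KeyError: excluded by Pre_

def calc_dist_dir (s : String) (e : String) : List String := pvCalcAux 8 s e

-- ===== PORT B =====
-- all distinct interleavings of r '>'s, l '<'s, d 'v's, u '^'s, in priority order > < v ^;
-- the fuel (first argument, = r+l+d+u at the call) only makes the recursion structural
def pvSeqsAux : Nat → Nat → Nat → Nat → Nat → List String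
  | 0, _, _, _, _ => [""]
  | n + 1, r, l, d, u =>
    if r = 0 ∧ l = 0 ∧ d = 0 ∧ u = 0 then [""]
    else
      (if r ≠ 0 then (pvSeqsAux n (r - 1) l d u).map (">" ++ ·) else []) ++
      (if l ≠ 0 then (pvSeqsAux n r (l - 1) d u).map ("<" ++ ·) else []) ++
      (if d ≠ 0 then (pvSeqsAux n r l (d - 1) u).map ("v" ++ ·) else []) ++
      (if u ≠ 0 then (pvSeqsAux n r l d (u - 1)).map ("^" ++ ·) else [])

def pvSeqs (r l d u : Nat) : List String := pvSeqsAux (r + l + d + u) r l d u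

-- walk path from (x, y); true iff the gap (0, 0) is never entered
def pvSafe : Int → Int → List Char → Bool
  | _, _, [] => true
  | x, y, c :: rest =>
    let x' := if c = '>' then x else if c = '<' then x else if c = 'v' then x + 1 else x - 1
    let y' := if c = '>' then y + 1 else if c = '<' then y - 1 else y
    if x' = 0 ∧ y' = 0 then false else pvSafe x' y' rest

def calc_dist_dir_alt (s : String) (e : String) : List String :=
  if s == e then [""]
  else
    match PySem.Dict.get? pvDicPos2 s, PySem.Dict.get? pvDicPos2 e with
    | some (sx, sy), some (ex, ey) =>
      let moves := pvSeqs (max (ey - sy) 0).toNat (max (sy - ey) 0).toNat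
                          (max (ex - sx) 0).toNat (max (sx - ex) 0).toNat
      moves.filter (fun p => pvSafe sx sy p.toList)
    | _, _ => []   -- _POS[s] / _POS[e] raises KeyError: excluded by Pre_

-- ===== PRECONDITION & SPEC =====
-- Pre_ excludes exactly the inputs where Python A raises KeyError: s ≠ e with s or e not a key of dic_pos2.
def Pre_calc_dist_dir (s : String) (e : String) : Prop :=
  s = e ∨ (s ∈ (["^", "A", "<", "v", ">"] : List String) ∧ e ∈ (["^", "A", "<", "v", ">"] : List String))
instance (s : String) (e : String) : Decidable (Pre_calc_dist_dir s e) := by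
  unfold Pre_calc_dist_dir; infer_instance

def pvWitness_calc_dist_dir : String × String := ("A", "<")

def Spec_calc_dist_dir (s : String) (e : String) (out : List String) : Prop := out = calc_dist_dir_alt s e
instance (s : String) (e : String) (out : List String) : Decidable (Spec_calc_dist_dir s e out) := by unfold Spec_calc_dist_dir; infer_instance

-- ===== CLAIM (what is proved, stated in full; the proofs are below) =====
def Claim_equal_calc_dist_dir : Prop := ∀ (s : String) (e : String), Dom_calc_dist_dir s e → Pre_calc_dist_dir s e → Spec_calc_dist_dir s e (calc_dist_dir s e)

-- ===== LEMMAS AND PROOFS =====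

-- ===== VERDICT (by name: the statement is the Claim_ definition above) =====
theorem calc_dist_dir_spec : Claim_equal_calc_dist_dir := by
  intro s e _ hpre
  unfold Spec_calc_dist_dir
  rcases hpre with h | ⟨hs, he⟩
  · subst h
    simp [calc_dist_dir, calc_dist_dir_alt, pvCalcAux]
  · fin_cases hs <;> fin_cases he <;> decide
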